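-- pv_equiv track=rewrite | github.com/Ilyass-Dahaoui/Data_Engineering | src/utils.py | merge_reviews
-- ===== SOURCE A (Python) =====
-- from typing import List, Dict, Any
--
-- def merge_reviews(existing: List[Dict[str, Any]], new: List[Dict[str, Any]]) -> List[Dict[str, Any]]:
--     """Merge two lists of review dicts using review_id as key.
--     If a review_id exists in both, the newer dictionary overwrites.
--     """
--     merged = {r['review_id']: r for r in existing}
--     for r in new:
--         rid = r.get('review_id')
--         if rid is None:
--             continue
--         merged[rid] = r
--     return list(merged.values())
-- ===== SOURCE B (Python) =====
-- def merge_reviews(existing, new):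
--     """Merge two lists of review dicts using review_id as key; newer overwrites.
--
--     Staged: materialise the (id, review) stream once, then compute
--     first-occurrence order of ids, last value per id via a reverse scan,
--     and map the order through the last values.
--     """
--     combined = []
--     for r in existing:
--         combined.append((r['review_id'], r))
--     for r in new:
--         rid = r.get('review_id')
--         if rid is not None:
--             combined.append((rid, r))
--     order = []
--     seen = set()
--     for rid, _ in combined:
--         if rid not in seen:
--             seen.add(rid)
--             order.append(rid)
--     last = {}
--     for rid, r in reversed(combined):
--         if rid not in last:
--             last[rid] = r
--     return [last[rid] for rid in order]
-- ===== Notes on version B (the rewrite author's own statement) =====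
-- stated objective: alternative
-- what changed: Instead of A's single incremental ordered-dict merge, B materialises the whole (id, review) stream once and then computes the answer in three independent passes: the first-occurrence order of ids, the last review per id by a reverse scan that keeps the first value seen, and a final map of the order through those last values.
import Mathlib
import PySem

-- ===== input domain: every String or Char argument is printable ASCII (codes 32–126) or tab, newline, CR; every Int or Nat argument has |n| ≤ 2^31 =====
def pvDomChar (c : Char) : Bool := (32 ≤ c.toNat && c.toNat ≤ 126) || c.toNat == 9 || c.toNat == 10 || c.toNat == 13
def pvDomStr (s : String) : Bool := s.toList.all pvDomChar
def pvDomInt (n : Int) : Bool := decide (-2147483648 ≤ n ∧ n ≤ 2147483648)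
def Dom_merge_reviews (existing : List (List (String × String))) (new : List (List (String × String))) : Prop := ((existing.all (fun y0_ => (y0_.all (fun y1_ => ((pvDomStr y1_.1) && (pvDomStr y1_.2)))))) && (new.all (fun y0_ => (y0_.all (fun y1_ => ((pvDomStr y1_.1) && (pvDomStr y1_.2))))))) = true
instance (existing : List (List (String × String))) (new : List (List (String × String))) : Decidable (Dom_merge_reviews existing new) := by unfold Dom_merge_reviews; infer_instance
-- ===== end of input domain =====

-- B replaces A's incremental ordered-dict merge by staged passes over the materialised
-- (id, review) stream: first-occurrence order, last value per id via a reverse scan,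
-- then a map (objective: alternative).

-- ===== PORT A =====
-- {r['review_id']: r for r in existing}; the '.getD ""' is reached only outside Pre_ (Python raises KeyError there)
def merge_reviews (existing : List (List (String × String))) (new : List (List (String × String))) : List (List (String × String)) :=
  let merged : PySem.Dict String (List (String × String)) :=
    existing.foldl (fun d r => d.insert ((r.lookup "review_id").getD "") r) PySem.Dict.empty
  let merged :=
    new.foldl (fun d r =>
      match r.lookup "review_id" with
      | none => d            -- rid is None: continue
      | some rid => d.insert rid r) merged
  merged.values

-- ===== PORT B =====
def merge_reviews_alt (existing : List (List (String × String))) (new : List (List (String × String))) : List (List (String × String)) :=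
  -- combined: the (rid, r) stream; existing's r['review_id'] raises outside Pre_ (getD "" there)
  let combined : List (String × List (String × String)) :=
    existing.foldl (fun acc r => acc ++ [((r.lookup "review_id").getD "", r)]) []
  let combined :=
    new.foldl (fun acc r =>
      match r.lookup "review_id" with
      | none => acc          -- rid is None: skip
      | some rid => acc ++ [(rid, r)]) combined
  -- order/seen loop: both hold the first occurrences in order, i.e. one PySem.Set
  let order : PySem.Set String :=
    combined.foldl (fun s p => PySem.Set.add s p.1) PySem.Set.empty
  -- last: reverse scan keeping the first value seen per id
  let last : PySem.Dict String (List (String × String)) :=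
    combined.reverse.foldl
      (fun d p => if d.contains p.1 then d else d.insert p.1 p.2) PySem.Dict.empty
  -- [last[rid] for rid in order]; rid ∈ order ⊆ keys of last, so Python's last[rid] never raises
  order.map (fun rid => last.getD rid [])

-- ===== PRECONDITION & SPEC =====
-- Pre_ excludes exactly the inputs where Python A raises KeyError: an existing review without
-- a 'review_id' key (Python B raises there too).
def Pre_merge_reviews (existing : List (List (String × String))) (new : List (List (String × String))) : Prop :=
  ∀ r ∈ existing, (r.lookup "review_id").isSome = true
instance (existing : List (List (String × String))) (new : List (List (String × String))) : Decidable (Pre_merge_reviews existing new) := by unfold Pre_merge_reviews; infer_instance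
def pvWitness_merge_reviews : (List (List (String × String))) × (List (List (String × String))) :=
  ([[("review_id", "1"), ("text", "ok")]], [[("review_id", "2")], [("text", "no id")]])

def Spec_merge_reviews (existing : List (List (String × String))) (new : List (List (String × String))) (out : List (List (String × String))) : Prop := out = merge_reviews_alt existing new
instance (existing : List (List (String × String))) (new : List (List (String × String))) (out : List (List (String × String))) : Decidable (Spec_merge_reviews existing new out) := by unfold Spec_merge_reviews; infer_instance

-- ===== CLAIM (what is proved, stated in full; the proofs are below) =====
def Claim_equal_merge_reviews : Prop := ∀ (existing : List (List (String × String))) (new : List (List (String × String))), Dom_merge_reviews existing new → Pre_merge_reviews existing new → Spec_merge_reviews existing new (merge_reviews existing new)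

-- ===== LEMMAS AND PROOFS =====

-- A's match-fold over `new` is the pair-insert fold over the filterMapped pairs
theorem foldA_match (l : List (List (String × String)))
    (d : PySem.Dict String (List (String × String))) :
    l.foldl (fun d r => match r.lookup "review_id" with
        | none => d
        | some rid => d.insert rid r) d
      = (l.filterMap (fun r => (r.lookup "review_id").map (fun rid => (rid, r)))).foldl
          (fun d p => d.insert p.1 p.2) d := by
  induction l generalizing d with
  | nil => rfl
  | cons r t ih =>
    cases h : r.lookup "review_id" with
    | none => simp [h, ih]
    | some rid => simp [h, ih]

-- B's match-fold over `new` appends the filterMapped pairs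
theorem foldB_match (l : List (List (String × String)))
    (c : List (String × List (String × String))) :
    l.foldl (fun acc r => match r.lookup "review_id" with
        | none => acc
        | some rid => acc ++ [(rid, r)]) c
      = c ++ l.filterMap (fun r => (r.lookup "review_id").map (fun rid => (rid, r))) := by
  induction l generalizing c with
  | nil => simp
  | cons r t ih =>
    cases h : r.lookup "review_id" with
    | none => simp [h, ih]
    | some rid => simp [h, ih]

-- last-wins insert fold: lookup is the last occurrence (first in the reversed list)
theorem get?_foldl_insert {V : Type} (l : List (String × V))
    (d : PySem.Dict String V) (k : String) :
    (l.foldl (fun d p => d.insert p.1 p.2) d).get? k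
      = ((l.reverse.find? (fun p => p.1 == k)).map Prod.snd).or (d.get? k) := by
  induction l generalizing d with
  | nil => simp
  | cons p t ih =>
    rw [List.foldl_cons, ih, List.reverse_cons, List.find?_append]
    cases hf : t.reverse.find? (fun q => q.1 == k) with
    | some q => simp
    | none =>
      rw [PySem.Dict.get?_insert d p.1 k p.2]
      by_cases hk : k = p.1
      · simp [hk, List.find?]
      · have hbk : (p.1 == k) = false := by simpa using fun h => hk h.symm
        simp [hk, List.find?, hbk]

-- skip-if-present fold: lookup is the initial binding, else the first occurrence
theorem get?_foldl_skip {V : Type} (l : List (String × V))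
    (d : PySem.Dict String V) (k : String) :
    (l.foldl (fun d p => if d.contains p.1 then d else d.insert p.1 p.2) d).get? k
      = (d.get? k).or ((l.find? (fun p => p.1 == k)).map Prod.snd) := by
  induction l generalizing d with
  | nil => simp
  | cons p t ih =>
    rw [List.foldl_cons, ih]
    by_cases hc : d.contains p.1
    · rw [if_pos hc]
      by_cases hk : k = p.1
      · rw [← hk] at hc
        have hs : (d.get? k).isSome = true := by
          rw [← PySem.Dict.contains_eq_isSome_get?]; exact hc
        obtain ⟨v, hv⟩ := Option.isSome_iff_exists.mp hs
        simp [hv]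
      · have hbk : (p.1 == k) = false := by simpa using fun h => hk h.symm
        simp [List.find?, hbk]
    · rw [if_neg hc]
      rw [PySem.Dict.get?_insert d p.1 k p.2]
      by_cases hk : k = p.1
      · have hg : d.get? p.1 = none := Option.not_isSome_iff_eq_none.mp
          (by rw [← PySem.Dict.contains_eq_isSome_get?]; simpa using hc)
        simp [hk, hg, List.find?]
      · have hbk : (p.1 == k) = false := by simpa using fun h => hk h.symm
        simp [hk, List.find?, hbk]

-- ===== VERDICT (by name: the statement is the Claim_ definition above) =====
theorem merge_reviews_spec : Claim_equal_merge_reviews := by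
  intro existing new _ _
  simp only [Spec_merge_reviews, merge_reviews, merge_reviews_alt]
  rw [foldB_match, foldA_match, PySem.List.foldl_append_singleton_eq_map, List.nil_append]
  have hEx : existing.foldl
        (fun d r => d.insert ((r.lookup "review_id").getD "") r) PySem.Dict.empty
      = (existing.map (fun r => ((r.lookup "review_id").getD "", r))).foldl
          (fun d p => d.insert p.1 p.2) PySem.Dict.empty := by
    rw [List.foldl_map]
  rw [hEx, ← List.foldl_append]
  set c : List (String × List (String × String)) :=
    existing.map (fun r => ((r.lookup "review_id").getD "", r))
      ++ new.filterMap (fun r => (r.lookup "review_id").map (fun rid => (rid, r)))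
    with hc
  have hnd : (c.foldl (fun d p => d.insert p.1 p.2) PySem.Dict.empty).keys.Nodup :=
    PySem.Dict.nodup_keys_foldl_insert_key c Prod.fst (fun _ p => p.2)
      PySem.Dict.empty PySem.Dict.nodup_keys_empty
  have hkeys : (c.foldl (fun d p => d.insert p.1 p.2) PySem.Dict.empty).keys
      = PySem.Set.ofList (c.map Prod.fst) := by
    rw [PySem.Set.ofList_eq_foldl]
    exact (PySem.Dict.keys_foldl_insert_key c Prod.fst (fun _ p => p.2)
      PySem.Dict.empty).trans rfl
  have horder : c.foldl (fun s p => PySem.Set.add s p.1) PySem.Set.empty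
      = PySem.Set.ofList (c.map Prod.fst) := by
    rw [PySem.Set.ofList_eq_foldl, List.foldl_map]
    rfl
  rw [PySem.Dict.values_eq_map_keys _ hnd [], hkeys, horder]
  refine List.map_congr_left fun k _ => ?_
  rw [PySem.Dict.getD_eq_get?_getD, PySem.Dict.getD_eq_get?_getD,
    get?_foldl_insert, get?_foldl_skip]
  simp
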